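-- pv_equiv track=rewrite | github.com/RikVN/Neural_DRS | src/semtag_analysis.py | indices_per_tag
-- ===== SOURCE A (Python) =====
-- def indices_per_tag(tag_list):
--     '''Get all documents (indices) for which a certain tag occurs'''
--     tag_dict = {}
--     for idx, tags in enumerate(tag_list):
--         for tag in tags:
--             if tag in tag_dict:
--                 # Don't add same tag twice, not needed
--                 if idx not in tag_dict[tag]:
--                     tag_dict[tag].append(idx)
--             else:
--                 tag_dict[tag] = [idx]
--     return tag_dict
-- ===== SOURCE B (Python) =====
-- def indices_per_tag(tag_list):
--     '''Get all documents (indices) for which a certain tag occurs'''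
--     # Pass 1: distinct tags in first-appearance order.
--     order = []
--     seen = set()
--     for tags in tag_list:
--         for t in tags:
--             if t not in seen:
--                 seen.add(t)
--                 order.append(t)
--     # Pass 2: per tag, one scan over the documents.
--     return {t: [idx for idx, tags in enumerate(tag_list) if t in tags] for t in order}
-- ===== Notes on version B (the rewrite author's own statement) =====
-- stated objective: alternative
-- what changed: Transposed loop nesting: B first collects the distinct tags in first-appearance order, then builds each tag's index list by a per-tag scan over enumerate(tag_list), instead of A's per-document accumulation into a dict with membership tests on the growing value lists.
import Mathlib
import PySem

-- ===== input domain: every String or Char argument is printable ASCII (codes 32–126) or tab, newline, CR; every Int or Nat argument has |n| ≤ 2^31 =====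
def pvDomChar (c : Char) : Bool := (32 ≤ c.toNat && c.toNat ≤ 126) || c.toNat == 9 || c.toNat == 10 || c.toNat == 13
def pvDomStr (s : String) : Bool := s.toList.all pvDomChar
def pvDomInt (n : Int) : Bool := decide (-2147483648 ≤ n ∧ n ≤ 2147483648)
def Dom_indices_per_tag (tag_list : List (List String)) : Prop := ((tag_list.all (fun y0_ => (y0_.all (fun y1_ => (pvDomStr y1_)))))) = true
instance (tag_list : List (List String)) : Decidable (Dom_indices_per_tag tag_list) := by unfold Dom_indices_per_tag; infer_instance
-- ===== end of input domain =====

-- B transposes the loop nesting: one pass collects the distinct tags in first-appearance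
-- order, then each tag's index list is built by its own scan over enumerate(tag_list).

-- ===== PORT A =====
-- inner 'for tag in tags' body of A
def ipt_stepTag (idx : Int) (d : PySem.Dict String (List Int)) (tag : String) :
    PySem.Dict String (List Int) :=
  match d.get? tag with
  | some l => if l.contains idx then d else d.insert tag (l ++ [idx])
  | none => d.insert tag [idx]

def indices_per_tag (tag_list : List (List String)) : List (String × List Int) :=
  ((PySem.List.enumerate tag_list).foldl
    (fun d p => p.2.foldl (ipt_stepTag p.1) d) PySem.Dict.empty).items

-- ===== PORT B =====
-- pass 1 inner body: (seen, order) updated per tag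
def ipt_seenStep (st : PySem.Set String × List String) (t : String) :
    PySem.Set String × List String :=
  if PySem.Set.contains st.1 t then st else (PySem.Set.add st.1 t, st.2 ++ [t])

def indices_per_tag_alt (tag_list : List (List String)) : List (String × List Int) :=
  let st := tag_list.foldl (fun st tags => tags.foldl ipt_seenStep st) (PySem.Set.empty, [])
  st.2.map (fun t =>
    (t, ((PySem.List.enumerate tag_list).filter (fun p => p.2.contains t)).map (·.1)))

-- ===== PRECONDITION & SPEC =====
def Spec_indices_per_tag (tag_list : List (List String)) (out : List (String × List Int)) : Prop := out = indices_per_tag_alt tag_list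
instance (tag_list : List (List String)) (out : List (String × List Int)) : Decidable (Spec_indices_per_tag tag_list out) := by unfold Spec_indices_per_tag; infer_instance

-- ===== CLAIM (what is proved, stated in full; the proofs are below) =====
def Claim_equal_indices_per_tag : Prop := ∀ (tag_list : List (List String)), Dom_indices_per_tag tag_list → Spec_indices_per_tag tag_list (indices_per_tag tag_list)

-- ===== LEMMAS AND PROOFS =====

-- the per-tag index list B computes
def ipt_idxs (tag_list : List (List String)) (t : String) : List Int :=
  ((PySem.List.enumerate tag_list).filter (fun p => p.2.contains t)).map (·.1)

lemma ipt_enumerate_append (xs ys : List (List String)) (s : Int) :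
    PySem.List.enumerate (xs ++ ys) s
      = PySem.List.enumerate xs s ++ PySem.List.enumerate ys (s + xs.length) := by
  induction xs generalizing s with
  | nil => simp [PySem.List.enumerate_nil]
  | cons x xs ih =>
      simp [PySem.List.enumerate_cons, ih]
      ring_nf

lemma ipt_items_mk {K V : Type} [BEq K] (L : List (K × V)) : (PySem.Dict.mk L).items = L := rfl

lemma ipt_dedup_append (a b : List String) :
    PySem.List.dedup (a ++ b)
      = PySem.List.dedup a ++ (PySem.List.dedup b).filter (fun y => !(List.contains (PySem.List.dedup a) y)) := by
  simp only [PySem.List.dedup_eq_ofList, PySem.Set.ofList_append,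
    PySem.Set.update_eq_append_filter, PySem.Set.contains_eq_listContains]

lemma ipt_dedup_cons (t : String) (x : List String) :
    PySem.List.dedup (t :: x) = t :: (PySem.List.dedup x).filter (fun y => !(y == t)) := by
  have h : t :: x = [t] ++ x := rfl
  rw [h, ipt_dedup_append]
  have h1 : PySem.List.dedup [t] = [t] := by
    simp [PySem.List.dedup_eq_ofList, PySem.Set.ofList_eq_self_of_nodup]
  rw [h1]
  simp only [List.singleton_append, List.cons.injEq, true_and]
  apply List.filter_congr
  intro y _
  by_cases hyt : y = t
  · simp [hyt]
  · simp [hyt]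

lemma ipt_key_val (d : PySem.Dict String (List Int)) (hnd : d.keys.Nodup)
    (t : String) (v : List Int) (h : d.get? t = some v)
    (p : String × List Int) (hp : p ∈ d.items) (hpt : p.1 = t) : p.2 = v := by
  have hp2 : (p.1, p.2) ∈ d.items := by simpa using hp
  have h2 : d.get? p.1 = some p.2 := PySem.Dict.get?_of_mem_items _ hp2 hnd
  rw [hpt, h] at h2
  exact (Option.some.inj h2).symm

lemma ipt_not_mem_keys (d : PySem.Dict String (List Int)) (t : String)
    (hct : d.contains t = false) (p : String × List Int) (hp : p ∈ d.items) : p.1 ≠ t := by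
  intro hpt
  have hk : p.1 ∈ d.keys := PySem.Dict.mem_keys_of_mem_items _ hp
  rw [hpt] at hk
  rw [← PySem.Dict.contains_iff_mem_keys] at hk
  simp [hct] at hk

-- one document at index n, processed by A's inner loop over its tags
lemma ipt_inner (x : List String) (n : Int) (d : PySem.Dict String (List Int))
    (hnd : d.keys.Nodup) :
    x.foldl (ipt_stepTag n) d
      = PySem.Dict.mk
          (d.items.map (fun p => (p.1, p.2 ++ if !(p.2.contains n) && x.contains p.1 then [n] else []))
           ++ ((PySem.List.dedup x).filter (fun t => !(d.contains t))).map (fun t => (t, [n]))) := by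
  induction x generalizing d with
  | nil =>
      simp only [List.foldl_nil]
      apply PySem.Dict.ext
      rw [ipt_items_mk]
      have hd : PySem.List.dedup ([] : List String) = [] := by
        simp [PySem.List.dedup_eq_ofList]
      simp [hd]
  | cons t x ih =>
      rw [List.foldl_cons]
      cases h : d.get? t with
      | some v =>
          have hct : d.contains t = true := by
            rw [PySem.Dict.contains_eq_isSome_get?, h]; rfl
          by_cases hv : v.contains n = true
          · -- idx already recorded: step is a no-op
            have hnv : n ∈ v := by simpa using hv
            have hstep : ipt_stepTag n d t = d := by simp [ipt_stepTag, h, hnv]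
            rw [hstep, ih d hnd]
            apply PySem.Dict.ext
            rw [ipt_items_mk, ipt_items_mk]
            congr 1
            · apply List.map_congr_left
              intro p hp
              by_cases hpt : p.1 = t
              · have hv2 : p.2 = v := ipt_key_val d hnd t v h p hp hpt
                simp [hv2, hnv]
              · simp [hpt]
            · rw [ipt_dedup_cons]
              have hPt : (!(d.contains t)) = false := by simp [hct]
              rw [List.filter_cons_of_neg (by simp [hct]), List.filter_filter]
              congr 1
              apply List.filter_congr
              intro y _
              by_cases hyt : y = t
              · subst hyt; simp [hct]
              · simp [hyt]
          · -- append n to the existing list for t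
            have hnv : n ∉ v := by simpa using hv
            have hstep : ipt_stepTag n d t = d.insert t (v ++ [n]) := by
              simp [ipt_stepTag, h, hnv]
            have hk' : (d.insert t (v ++ [n])).keys = d.keys :=
              PySem.Dict.keys_insert_of_contains _ _ hct
            have hnd' : (d.insert t (v ++ [n])).keys.Nodup := by rw [hk']; exact hnd
            rw [hstep, ih _ hnd']
            apply PySem.Dict.ext
            rw [ipt_items_mk, ipt_items_mk]
            congr 1
            · rw [show (d.insert t (v ++ [n])).items
                    = d.items.map (fun p => if p.1 == t then (t, v ++ [n]) else p) by
                  simp [PySem.Dict.items_insert, hct], List.map_map]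
              apply List.map_congr_left
              intro p hp
              by_cases hpt : p.1 = t
              · have hv2 : p.2 = v := ipt_key_val d hnd t v h p hp hpt
                have hbe : (p.1 == t) = true := by simp [hpt]
                simp [Function.comp, hbe, hpt, hv2, hnv]
              · have hne : (p.1 == t) = false := by simp [hpt]
                simp [Function.comp, hne, hpt]
            · rw [ipt_dedup_cons]
              rw [List.filter_cons_of_neg (by simp [hct]), List.filter_filter]
              congr 1
              apply List.filter_congr
              intro y _
              by_cases hyt : y = t
              · subst hyt; simp [PySem.Dict.contains_insert, hct]
              · have hne : (y == t) = false := by simp [hyt]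
                simp [PySem.Dict.contains_insert, hne]
      | none =>
          have hct : d.contains t = false := by
            rw [PySem.Dict.contains_eq_isSome_get?, h]; rfl
          have hstep : ipt_stepTag n d t = d.insert t [n] := by simp [ipt_stepTag, h]
          have hnd' : (d.insert t [n]).keys.Nodup := PySem.Dict.nodup_keys_insert d t [n] hnd
          rw [hstep, ih _ hnd']
          apply PySem.Dict.ext
          rw [ipt_items_mk, ipt_items_mk]
          rw [show (d.insert t [n]).items = d.items ++ [(t, [n])] by
            simp [PySem.Dict.items_insert, hct], List.map_append]
          rw [ipt_dedup_cons, List.filter_cons_of_pos (by simp [hct]), List.map_cons]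
          have hhead : ((t, [n]) : String × List Int).2 ++
              (if !(((t, [n]) : String × List Int).2.contains n) && x.contains ((t, [n]) : String × List Int).1 then [n] else []) = [n] := by
            simp
          simp only [List.map_cons, List.map_nil, List.append_assoc, List.singleton_append]
          congr 1
          · apply List.map_congr_left
            intro p hp
            have hpt : p.1 ≠ t := ipt_not_mem_keys d t hct p hp
            simp [hpt]
          · congr 1
            · simp
            · rw [List.filter_filter]
              congr 1
              apply List.filter_congr
              intro y _
              by_cases hyt : y = t
              · subst hyt; simp [PySem.Dict.contains_insert]
              · have hne : (y == t) = false := by simp [hyt]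
                simp [PySem.Dict.contains_insert, hne]

lemma ipt_idxs_not_contains (l : List (List String)) (t : String) :
    (ipt_idxs l t).contains ((l.length : Int)) = false := by
  have h : ((l.length : Int)) ∉ ipt_idxs l t := by
    intro hmem
    unfold ipt_idxs at hmem
    rcases List.mem_map.1 hmem with ⟨p, hp, hfst⟩
    have hp' : p ∈ PySem.List.enumerate l := List.mem_of_mem_filter hp
    have h1 : p.1 ∈ (PySem.List.enumerate l).map (·.1) := List.mem_map_of_mem hp'
    rw [PySem.List.map_fst_enumerate, PySem.List.mem_pyRange_one] at h1
    omega
  simpa using h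

lemma ipt_idxs_append (l : List (List String)) (x : List String) (t : String) :
    ipt_idxs (l ++ [x]) t = ipt_idxs l t ++ (if x.contains t then [(l.length : Int)] else []) := by
  unfold ipt_idxs
  rw [ipt_enumerate_append]
  simp only [PySem.List.enumerate_cons, PySem.List.enumerate_nil, zero_add,
    List.filter_append, List.map_append]
  by_cases hx : t ∈ x
  · simp [hx]
  · simp [hx]

lemma ipt_idxs_nil_of_not_mem (l : List (List String)) (t : String)
    (h : t ∉ l.flatten) : ipt_idxs l t = [] := by
  unfold ipt_idxs
  rw [List.map_eq_nil_iff, List.filter_eq_nil_iff]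
  intro p hp hcon
  apply h
  rw [List.mem_flatten]
  refine ⟨p.2, ?_, by simpa using hcon⟩
  have h1 : p.2 ∈ (PySem.List.enumerate l).map (·.2) := List.mem_map_of_mem hp
  rwa [PySem.List.map_snd_enumerate] at h1

-- the dict A has built over a whole prefix, characterised
lemma ipt_main (l : List (List String)) :
    ((PySem.List.enumerate l).foldl (fun d p => p.2.foldl (ipt_stepTag p.1) d)
        PySem.Dict.empty).items
      = (PySem.List.dedup l.flatten).map (fun t => (t, ipt_idxs l t)) := by
  induction l using List.reverseRecOn with
  | nil =>
      have h0 : PySem.Dict.empty.items = ([] : List (String × List Int)) := rfl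
      simp [PySem.List.enumerate_nil, PySem.List.dedup_eq_ofList, h0]
  | append_singleton l x ih =>
      have hE : PySem.List.enumerate (l ++ [x])
          = PySem.List.enumerate l ++ [((l.length : Int), x)] := by
        rw [ipt_enumerate_append]
        simp [PySem.List.enumerate_cons, PySem.List.enumerate_nil]
      have hkeys : ((PySem.List.enumerate l).foldl
          (fun d p => p.2.foldl (ipt_stepTag p.1) d) PySem.Dict.empty).keys
            = PySem.List.dedup l.flatten := by
        simp only [PySem.Dict.keys, ih, List.map_map]
        have hc : ((fun (x : String × List Int) => x.1) ∘ fun t => (t, ipt_idxs l t))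
            = fun t => t := by funext t; rfl
        simp [hc]
      have hnd : ((PySem.List.enumerate l).foldl
          (fun d p => p.2.foldl (ipt_stepTag p.1) d) PySem.Dict.empty).keys.Nodup := by
        rw [hkeys]; exact PySem.List.nodup_dedup l.flatten
      rw [hE, List.foldl_append, List.foldl_cons, List.foldl_nil]
      rw [ipt_inner x (l.length) _ hnd, ipt_items_mk, ih]
      rw [List.flatten_append, List.flatten_cons, List.flatten_nil, List.append_nil,
        ipt_dedup_append, List.map_append, List.map_map]
      congr 1
      · apply List.map_congr_left
        intro t _
        simp only [Function.comp]
        rw [ipt_idxs_not_contains, ipt_idxs_append]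
        by_cases hx : t ∈ x
        · simp [hx]
        · simp [hx]
      · have hcont : ∀ y : String, (!((((PySem.List.enumerate l).foldl
            (fun d p => p.2.foldl (ipt_stepTag p.1) d) PySem.Dict.empty)).contains y))
              = (!(List.contains (PySem.List.dedup l.flatten) y)) := by
          intro y
          rw [PySem.Dict.contains_eq_decide_mem_keys, hkeys]
          simp [List.elem_eq_mem]
        have hfe : ((PySem.List.dedup x).filter (fun t => !((((PySem.List.enumerate l).foldl
            (fun d p => p.2.foldl (ipt_stepTag p.1) d) PySem.Dict.empty)).contains t)))
              = (PySem.List.dedup x).filter (fun y => !(List.contains (PySem.List.dedup l.flatten) y)) := by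
          apply List.filter_congr
          intro y _
          exact hcont y
        rw [hfe]
        apply List.map_congr_left
        intro y hy
        rcases List.mem_filter.1 hy with ⟨hy1, hy2⟩
        have hyx : y ∈ x := (PySem.List.mem_dedup _ _).1 hy1
        have hynf : y ∉ l.flatten := by
          intro hmem
          have hm2 : y ∈ PySem.List.dedup l.flatten := (PySem.List.mem_dedup _ _).2 hmem
          simp at hy2
          rcases List.mem_flatten.1 hmem with ⟨a, ha, hya⟩
          exact hy2 a ha hya
        rw [ipt_idxs_append, ipt_idxs_nil_of_not_mem l y hynf]
        simp [hyx]

lemma ipt_seen_fold (xs : List String) (s : List String) :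
    xs.foldl ipt_seenStep (s, s) = (PySem.Set.update s xs, PySem.Set.update s xs) := by
  induction xs generalizing s with
  | nil => simp [PySem.Set.update_nil]
  | cons t xs ih =>
      rw [List.foldl_cons, PySem.Set.update_cons]
      have hstep : ipt_seenStep (s, s) t = (PySem.Set.add s t, PySem.Set.add s t) := by
        by_cases hm : t ∈ s
        · simp [ipt_seenStep, hm, PySem.Set.add_of_mem hm]
        · simp [ipt_seenStep, hm, PySem.Set.add_of_not_mem hm]
      rw [hstep, ih]

-- B's first pass computes the ordered dedup of all tags
lemma ipt_order (l : List (List String)) :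
    (l.foldl (fun st tags => tags.foldl ipt_seenStep st) (PySem.Set.empty, [])).2
      = PySem.List.dedup l.flatten := by
  have h : (PySem.Set.empty, ([] : List String)) = (([] : List String), ([] : List String)) := rfl
  rw [h, ← List.foldl_flatten, ipt_seen_fold]
  simp [PySem.Set.update_nil_left, PySem.List.dedup_eq_ofList]

-- ===== VERDICT (by name: the statement is the Claim_ definition above) =====
theorem indices_per_tag_spec : Claim_equal_indices_per_tag := by
  intro tag_list _
  show indices_per_tag tag_list = indices_per_tag_alt tag_list
  rw [indices_per_tag, indices_per_tag_alt, ipt_main, ipt_order]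
  rfl
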